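-- pv_equiv track=rewrite | github.com/darius024/persona2hire | persona2hire/ml/feature_extractor.py | _get_education_level
-- ===== SOURCE A (Python) =====
-- def _get_education_level(qual_text: str) -> int:
--     """Get education level from qualification text (0-6)."""
--     levels = {
--         6: ["phd", "doctorate", "doctoral"],
--         5: ["master", "msc", "ma", "mba"],
--         4: ["bachelor", "bsc", "ba", "degree"],
--         3: ["diploma", "associate"],
--         2: ["certificate", "vocational"],
--         1: ["high school", "secondary", "a-level"],
--     }
--
--     for level, keywords in levels.items():
--         if any(kw in qual_text for kw in keywords):
--             return level
--     return 0
-- ===== SOURCE B (Python) =====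
-- _KEYWORD_LEVELS = [
--     ("phd", 6), ("doctorate", 6), ("doctoral", 6),
--     ("master", 5), ("msc", 5), ("ma", 5), ("mba", 5),
--     ("bachelor", 4), ("bsc", 4), ("ba", 4), ("degree", 4),
--     ("diploma", 3), ("associate", 3),
--     ("certificate", 2), ("vocational", 2),
--     ("high school", 1), ("secondary", 1), ("a-level", 1),
-- ]
--
-- # first-character index: char -> list of (keyword, level) starting with it
-- _INDEX = {}
-- for _kw, _lvl in _KEYWORD_LEVELS:
--     _INDEX.setdefault(_kw[0], []).append((_kw, _lvl))
--
--
-- def _get_education_level(qual_text: str) -> int: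
--     """Get education level from qualification text (0-6)."""
--     best = 0
--     for i in range(len(qual_text)):
--         for kw, lvl in _INDEX.get(qual_text[i], []):
--             if best < lvl and qual_text.startswith(kw, i):
--                 best = lvl
--     return best
-- ===== Notes on version B (the rewrite author's own statement) =====
-- stated objective: alternative
-- what changed: A runs 18 whole-text substring searches in priority order and returns at the first hit; B makes one left-to-right scan over the text, using a precomputed first-character index to test only the keywords that could start at each position, and keeps a running maximum of the matched levels.
import Mathlib
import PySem

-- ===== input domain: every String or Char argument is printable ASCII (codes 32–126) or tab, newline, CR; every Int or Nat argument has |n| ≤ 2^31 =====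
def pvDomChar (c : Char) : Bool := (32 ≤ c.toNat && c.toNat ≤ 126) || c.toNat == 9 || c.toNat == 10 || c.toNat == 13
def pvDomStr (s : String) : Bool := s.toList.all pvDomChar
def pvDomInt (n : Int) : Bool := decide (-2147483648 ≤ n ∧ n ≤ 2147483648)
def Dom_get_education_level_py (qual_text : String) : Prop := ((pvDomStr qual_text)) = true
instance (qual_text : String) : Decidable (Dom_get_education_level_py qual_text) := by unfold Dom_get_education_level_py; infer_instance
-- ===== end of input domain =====

-- B replaces A's keyword-driven priority scan (18 whole-text substring searches with early return)
-- by a text-driven single left-to-right scan: at each position the first character selects, via a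
-- precomputed first-character index, the few keywords that could start there, and a running maximum
-- of the matched levels is kept; alternative decomposition, same result.

-- ===== PORT A =====
def pvLevels : List (Int × List String) :=
  [(6, ["phd", "doctorate", "doctoral"]),
   (5, ["master", "msc", "ma", "mba"]),
   (4, ["bachelor", "bsc", "ba", "degree"]),
   (3, ["diploma", "associate"]),
   (2, ["certificate", "vocational"]),
   (1, ["high school", "secondary", "a-level"])]

-- the 'for level, keywords in levels.items(): if any(...): return level' loop, step for step
def pvALoop (qual_text : String) : List (Int × List String) → Int
  | [] => 0
  | (level, keywords) :: rest =>
      if keywords.any (fun kw => PySem.Str.isIn kw qual_text) then level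
      else pvALoop qual_text rest

def get_education_level_py (qual_text : String) : Int :=
  pvALoop qual_text pvLevels

-- ===== PORT B =====
def pvKWLevels : List (String × Int) :=
  [("phd", 6), ("doctorate", 6), ("doctoral", 6),
   ("master", 5), ("msc", 5), ("ma", 5), ("mba", 5),
   ("bachelor", 4), ("bsc", 4), ("ba", 4), ("degree", 4),
   ("diploma", 3), ("associate", 3),
   ("certificate", 2), ("vocational", 2),
   ("high school", 1), ("secondary", 1), ("a-level", 1)]

-- the module-level '_INDEX.setdefault(_kw[0], []).append((_kw, _lvl))' loop
-- (_kw[0] is total here: every keyword is nonempty, so the ' ' default is never used)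
def pvIndex : PySem.Dict Char (List (String × Int)) :=
  pvKWLevels.foldl
    (fun d p => d.modify (PySem.List.pyGetD p.1.toList 0 ' ') [] (fun l => l ++ [p])) PySem.Dict.empty

-- the inner 'for kw, lvl in _INDEX.get(qual_text[i], []): if best < lvl and qual_text.startswith(kw, i)'
-- loop; 'qual_text.startswith(kw, i)' is ported exactly as 'qual_text[i:].startswith(kw)' (Python's
-- start argument is read as a slice bound), qual_text[i] via pyGetD (in range for every generated i)
def pvInner (q : List Char) (i : Int) (best : Int) : Int :=
  ((pvIndex.getD (PySem.List.pyGetD q i ' ') []).foldl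
    (fun b p =>
      if b < p.2 && PySem.Chars.startswith (PySem.List.slice q (some i) none) p.1.toList
      then p.2 else b) best)

def get_education_level_py_alt (qual_text : String) : Int :=
  (PySem.List.pyRange 0 (PySem.Str.len qual_text) 1).foldl
    (fun best i => pvInner qual_text.toList i best) 0

-- ===== PRECONDITION & SPEC =====
def Spec_get_education_level_py (qual_text : String) (out : Int) : Prop := out = get_education_level_py_alt qual_text
instance (qual_text : String) (out : Int) : Decidable (Spec_get_education_level_py qual_text out) := by unfold Spec_get_education_level_py; infer_instance

-- ===== CLAIM (what is proved, stated in full; the proofs are below) =====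
def Claim_equal_get_education_level_py : Prop := ∀ (qual_text : String), Dom_get_education_level_py qual_text → Spec_get_education_level_py qual_text (get_education_level_py qual_text)

-- ===== LEMMAS AND PROOFS =====

-- proof-side view of B's scan: recursion over the suffixes of the text
def pvInnerS (rest : List Char) (c : Char) (b : Int) : Int :=
  (pvIndex.getD c []).foldl
    (fun b p =>
      if b < p.2 && PySem.Chars.startswith rest p.1.toList then p.2 else b) b

def pvSfx : List Char → Int → Int
  | [], b => b
  | c :: cs, b => pvSfx cs (pvInnerS (c :: cs) c b)

-- max-update fold: accumulator only grows
theorem pvM1 (l : List (String × Int)) (rest : List Char) (b : Int) :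
    b ≤ l.foldl (fun b p =>
      if b < p.2 && PySem.Chars.startswith rest p.1.toList then p.2 else b) b := by
  induction l generalizing b with
  | nil => simp
  | cons x xs ih =>
    refine le_trans ?_ (ih _)
    by_cases h : (b < x.2 && PySem.Chars.startswith rest x.1.toList) = true
    · simp only [h, if_pos]
      simp only [Bool.and_eq_true, decide_eq_true_eq] at h
      omega
    · simp [h]

-- max-update fold: a matched element bounds the result from below
theorem pvM2 (l : List (String × Int)) (rest : List Char) (b : Int) (p : String × Int)
    (hp : p ∈ l) (hs : PySem.Chars.startswith rest p.1.toList = true) :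
    p.2 ≤ l.foldl (fun b p =>
      if b < p.2 && PySem.Chars.startswith rest p.1.toList then p.2 else b) b := by
  induction l generalizing b with
  | nil => simp at hp
  | cons x xs ih =>
    rcases List.mem_cons.mp hp with rfl | hmem
    · refine le_trans ?_ (pvM1 xs rest _)
      simp only [hs, Bool.and_true]
      simp only [decide_eq_true_eq]
      split <;> omega
    · exact ih _ hmem

-- max-update fold: bounded above by any bound of the matched elements
theorem pvM3 (rest : List Char) (B : Int) :
    ∀ (l : List (String × Int)) (b : Int), b ≤ B →
    (∀ p ∈ l, PySem.Chars.startswith rest p.1.toList = true → p.2 ≤ B) →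
    l.foldl (fun b p =>
      if b < p.2 && PySem.Chars.startswith rest p.1.toList then p.2 else b) b ≤ B := by
  intro l
  induction l with
  | nil => intro b hb _; simpa
  | cons x xs ih =>
    intro b hb hall
    refine ih _ ?_ (fun p hp hs => hall p (List.mem_cons_of_mem _ hp) hs)
    by_cases hlt : (b < x.2 && PySem.Chars.startswith rest x.1.toList) = true
    · simp only [hlt, if_pos]
      simp only [Bool.and_eq_true] at hlt
      exact hall x List.mem_cons_self hlt.2
    · simp [hlt, hb]

theorem pvP1 (r : List Char) (b : Int) : b ≤ pvSfx r b := by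
  induction r generalizing b with
  | nil => simp [pvSfx]
  | cons c cs ih => exact le_trans (pvM1 _ _ _) (ih _)

theorem pvP2 (p : String × Int) (c : Char) (cs : List Char)
    (hk : p.1.toList = c :: cs) (hreg : p ∈ pvIndex.getD c []) :
    ∀ (r : List Char) (b : Int), (c :: cs) <:+: r → p.2 ≤ pvSfx r b := by
  intro r
  induction r with
  | nil => intro b hinf; simp at hinf
  | cons a rs ih =>
    intro b hinf
    rcases List.infix_cons_iff.mp hinf with hpre | hinf'
    · obtain ⟨rfl, hcs⟩ := List.cons_prefix_cons.mp hpre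
      refine le_trans ?_ (pvP1 rs _)
      refine pvM2 _ _ _ p hreg ?_
      rw [PySem.Chars.startswith_iff, hk]
      exact List.cons_prefix_cons.mpr ⟨rfl, hcs⟩
    · exact ih _ hinf'

theorem pvP3 (B : Int) : ∀ (r : List Char) (b : Int), b ≤ B →
    (∀ (p : String × Int) (c : Char), p ∈ pvIndex.getD c [] →
      p.1.toList <:+: r → p.2 ≤ B) → pvSfx r b ≤ B := by
  intro r
  induction r with
  | nil => intro b hb _; simpa [pvSfx]
  | cons a rs ih =>
    intro b hb hall
    refine ih _ ?_ (fun p c hp hinf => hall p c hp (List.infix_cons hinf))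
    refine pvM3 _ B _ _ hb (fun p hp hs => ?_)
    exact hall p a hp ((PySem.Chars.startswith_iff _ _).mp hs).isInfix

-- A's loop on a cons cell
theorem pvALoop_cons (s : String) (x : Int × List String) (xs : List (Int × List String)) :
    pvALoop s (x :: xs) =
      if x.2.any (fun kw => PySem.Str.isIn kw s) then x.1 else pvALoop s xs := by
  obtain ⟨a, b⟩ := x; rfl

-- A-side: pvALoop of a level list with descending levels
theorem pvALoop_ge (s : String) (l : List (Int × List String))
    (hsort : l.Pairwise (fun x y => y.1 ≤ x.1)) (e : Int × List String) (he : e ∈ l)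
    (hhit : e.2.any (fun kw => PySem.Str.isIn kw s) = true) : e.1 ≤ pvALoop s l := by
  induction l with
  | nil => simp at he
  | cons x xs ih =>
    rw [pvALoop_cons]
    rcases List.mem_cons.mp he with rfl | hmem
    · rw [if_pos hhit]
    · by_cases hx : (x.2.any fun kw => PySem.Str.isIn kw s) = true
      · rw [if_pos hx]; exact (List.pairwise_cons.mp hsort).1 e hmem
      · rw [if_neg hx]; exact ih (List.pairwise_cons.mp hsort).2 hmem

theorem pvALoop_le (s : String) (l : List (Int × List String)) (B : Int) (hB : 0 ≤ B)
    (hall : ∀ e ∈ l, e.2.any (fun kw => PySem.Str.isIn kw s) = true → e.1 ≤ B) :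
    pvALoop s l ≤ B := by
  induction l with
  | nil => simpa [pvALoop]
  | cons x xs ih =>
    rw [pvALoop_cons]
    by_cases hx : (x.2.any fun kw => PySem.Str.isIn kw s) = true
    · rw [if_pos hx]; exact hall x List.mem_cons_self hx
    · rw [if_neg hx]; exact ih (fun e he hh => hall e (List.mem_cons_of_mem _ he) hh)

theorem pvALoop_nonneg (s : String) (l : List (Int × List String))
    (h : ∀ e ∈ l, 0 ≤ e.1) : 0 ≤ pvALoop s l := by
  induction l with
  | nil => simp [pvALoop]
  | cons x xs ih =>
    rw [pvALoop_cons]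
    by_cases hx : (x.2.any fun kw => PySem.Str.isIn kw s) = true
    · rw [if_pos hx]; exact h x List.mem_cons_self
    · rw [if_neg hx]; exact ih (fun e he => h e (List.mem_cons_of_mem _ he))

-- a looked-up value of an association-list dict is one of its bucket lists
theorem pvGetD_mem_flatten (l : List (Char × List (String × Int))) (c : Char)
    (p : String × Int) (h : p ∈ (PySem.Dict.mk l).getD c []) :
    p ∈ (l.map Prod.snd).flatten := by
  induction l with
  | nil => simp [PySem.Dict.getD, PySem.Dict.get?] at h
  | cons x xs ih =>
    obtain ⟨k, v⟩ := x
    rw [PySem.Dict.getD, PySem.Dict.get?_mk_cons] at h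
    by_cases hk : (k == c) = true
    · rw [if_pos hk, Option.getD_some] at h
      simp only [List.map_cons, List.flatten_cons]
      exact List.mem_append_left _ h
    · rw [if_neg hk] at h
      simp only [List.map_cons, List.flatten_cons]
      exact List.mem_append_right _ (ih h)

-- computed shape of the first-character index
theorem pvIndex_eq : pvIndex = PySem.Dict.mk
    [('p', [("phd", 6)]),
     ('d', [("doctorate", 6), ("doctoral", 6), ("degree", 4), ("diploma", 3)]),
     ('m', [("master", 5), ("msc", 5), ("ma", 5), ("mba", 5)]),
     ('b', [("bachelor", 4), ("bsc", 4), ("ba", 4)]),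
     ('a', [("associate", 3), ("a-level", 1)]),
     ('c', [("certificate", 2)]),
     ('v', [("vocational", 2)]),
     ('h', [("high school", 1)]),
     ('s', [("secondary", 1)])] := by decide

theorem pvFlatFact : ∀ q ∈ (([('p', [("phd", 6)]),
     ('d', [("doctorate", 6), ("doctoral", 6), ("degree", 4), ("diploma", 3)]),
     ('m', [("master", 5), ("msc", 5), ("ma", 5), ("mba", 5)]),
     ('b', [("bachelor", 4), ("bsc", 4), ("ba", 4)]),
     ('a', [("associate", 3), ("a-level", 1)]),
     ('c', [("certificate", 2)]),
     ('v', [("vocational", 2)]),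
     ('h', [("high school", 1)]),
     ('s', [("secondary", 1)])] : List (Char × List (String × Int))).map Prod.snd).flatten,
    q ∈ pvKWLevels := by decide

theorem pvMemIndex (c : Char) (p : String × Int) (h : p ∈ pvIndex.getD c []) :
    p ∈ pvKWLevels := by
  rw [pvIndex_eq] at h
  exact pvFlatFact p (pvGetD_mem_flatten _ c p h)

-- every keyword of A's table is registered in B's index under its first character
theorem pvF1 : ∀ e ∈ pvLevels, ∀ kw ∈ e.2,
    kw.toList ≠ [] ∧ (kw, e.1) ∈ pvIndex.getD (kw.toList.headD ' ') [] := by decide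

-- every indexed (keyword, level) pair appears in A's table
theorem pvF3 : ∀ p ∈ pvKWLevels, ∃ e ∈ pvLevels, p.2 = e.1 ∧ p.1 ∈ e.2 := by decide

theorem pvF4 : pvLevels.Pairwise (fun x y => y.1 ≤ x.1) := by decide

theorem pvF2 : ∀ e ∈ pvLevels, 0 ≤ e.1 := by decide

-- B's index-driven fold over positions is the suffix recursion
theorem pvBridgeAux (suf : List Char) : ∀ (pre : List Char) (b : Int),
    (PySem.List.pyRange (pre.length : Int) ((pre.length : Int) + (suf.length : Int)) 1).foldl
      (fun best i => pvInner (pre ++ suf) i best) b = pvSfx suf b := by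
  induction suf with
  | nil =>
    intro pre b
    rw [PySem.List.pyRange_one_eq_nil (by simp)]
    simp [pvSfx]
  | cons c cs ih =>
    intro pre b
    rw [PySem.List.pyRange_one_cons
      (by simp only [List.length_cons]; push_cast; omega)]
    simp only [List.foldl_cons]
    have h1 : pvInner (pre ++ c :: cs) (pre.length : Int) b = pvInnerS (c :: cs) c b := by
      unfold pvInner pvInnerS
      rw [PySem.List.slice_from_natCast, List.drop_left]
      simp [PySem.List.pyGetD_natCast, List.getD_eq_getElem?_getD]
    rw [h1]
    have h2 := ih (pre ++ [c]) (pvInnerS (c :: cs) c b)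
    have h3 : ((pre ++ [c]).length : Int) = (pre.length : Int) + 1 := by simp
    rw [h3] at h2
    have h4 : (pre ++ [c]) ++ cs = pre ++ c :: cs := by simp
    rw [h4] at h2
    rw [show (pre.length : Int) + ((c :: cs).length : Int)
          = (pre.length : Int) + 1 + (cs.length : Int) by
        simp only [List.length_cons]; push_cast; ring]
    rw [h2]
    simp [pvSfx]

theorem pvAltEq (s : String) : get_education_level_py_alt s = pvSfx s.toList 0 := by
  have := pvBridgeAux s.toList [] 0
  simpa [get_education_level_py_alt, PySem.Str.len_eq] using this

theorem pvMain (s : String) : get_education_level_py s = get_education_level_py_alt s := by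
  rw [pvAltEq, get_education_level_py]
  apply le_antisymm
  · -- A ≤ B: every level A can return is witnessed by an occurrence B's scan finds
    refine pvALoop_le s pvLevels _ (pvP1 _ _) (fun e he hhit => ?_)
    obtain ⟨kw, hkw, hin⟩ := List.any_eq_true.mp hhit
    obtain ⟨hne, hreg⟩ := pvF1 e he kw hkw
    obtain ⟨c, cs, hk⟩ := List.exists_cons_of_ne_nil hne
    have hinf : (c :: cs) <:+: s.toList := by
      rw [← hk]; exact (PySem.Str.isIn_iff_infix _ _).mp hin
    have hreg' : (kw, e.1) ∈ pvIndex.getD c [] := by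
      rwa [hk, List.headD_cons] at hreg
    exact pvP2 (kw, e.1) c cs hk hreg' s.toList 0 hinf
  · -- B ≤ A: everything B's scan can match is a keyword of some level A checks
    refine pvP3 _ s.toList 0 (pvALoop_nonneg s pvLevels pvF2) (fun p c hp hinf => ?_)
    obtain ⟨e, he, hlvl, hkw⟩ := pvF3 p (pvMemIndex c p hp)
    have hin : PySem.Str.isIn p.1 s = true := (PySem.Str.isIn_iff_infix _ _).mpr hinf
    have := pvALoop_ge s pvLevels pvF4 e he (List.any_eq_true.mpr ⟨p.1, hkw, hin⟩)
    omega

-- ===== VERDICT (by name: the statement is the Claim_ definition above) =====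
theorem get_education_level_py_spec : Claim_equal_get_education_level_py := by
  intro s _
  exact pvMain s
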